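-- pv_equiv track=rewrite | github.com/VaninaBlas/tp1-simBP | simbp.py | numero_con_mayor_simBP_en_intervalo
-- ===== SOURCE A (Python) =====
-- def simBP(n:int, m:int) -> int:
--     ''' Requiere: n>0, m>0
--         Devuelve: la similitud binaria de prefijo entre n y m, definida como
--         la longitud del prefijo común más largo entre las representaciones
--         binarias de n y m. '''
--     # Inicialización
--     i:int=0 #  para iterar el ciclo while
--     res:int=0 #  variable retorno
--     # Transformacion de los parametros a binario
--     num_binario_n:int=bin(n).replace('0b','')
--     num_binario_m:int=bin(m).replace('0b','')
--     #Longitudes de los numeros binarios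
--     longitud_binario_n:int=len(num_binario_n)
--     longitud_binario_m:int=len(num_binario_m)
--     #ciclo para obtener la simbp
--     while(i<longitud_binario_n and i<longitud_binario_m):
--         # si ambos tienen los mismos valores en su posicion i, res aumenta en 1
--         if(num_binario_n[i]==num_binario_m[i]):
--             res=res+1
--         # en caso contrario, que es cuando se acaba la simbp, detemos el ciclo while
--         else:
--             i=longitud_binario_n # para que no se cumpla la condicion del while y acabe el ciclo
--         i=i+1
--     return res
--
-- def numero_con_mayor_simBP_en_intervalo(n:int, a:int, b:int) -> int:
--     ''' Requiere: n>0, a>0, b>0, a<=b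
--         Devuelve: el número entre a y b (inclusive) con mayor simBP con n. En caso de haber más de uno, devuelve el menor de ellos.'''
--     #Inicialización
--     i:int=0 #  para iterarel ciclo while
--     mayor_simbp:int=0 # donde se va a guardar el mayor simbp entre a y b con n
--     res:int=0 # variable retorno
--     simBP_valor:int=0 # guardara la simbp entre un numero con n
--     numero_en_intervalo:int=0 # guardara un numero entre a y b
--     diferencia_ab:int=b-a # si a y b son iguales, la variable valdria 0, por lo tanto solo se evalúa un número
--     while(i<=diferencia_ab):
--         numero_en_intervalo=b-i #  recorre desde el mayor(b) hasta  el menor(a)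
--         simBP_valor=simBP(numero_en_intervalo, n) # se calcula la simbp
--         if(simBP_valor >= mayor_simbp):
--             mayor_simbp=simBP_valor
--             res=numero_en_intervalo # guarda el  menor numero con mayor simbp
--         i=i+1
--     return res
-- ===== SOURCE B (Python) =====
-- # simBP via binary search on the prefix length; interval scanned ascending with
-- # strict improvement, so ties keep the smallest candidate.
--
-- def _simbp(x, y):
--     sx = bin(x).replace('0b', '')
--     sy = bin(y).replace('0b', '')
--     lo, hi = 0, min(len(sx), len(sy))
--     while lo < hi:
--         mid = (lo + hi + 1) // 2
--         if sx[:mid] == sy[:mid]: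
--             lo = mid
--         else:
--             hi = mid - 1
--     return lo
--
-- def numero_con_mayor_simBP_en_intervalo(n, a, b):
--     best, res = -1, 0
--     for m in range(a, b + 1):
--         s = _simbp(m, n)
--         if s > best:
--             best, res = s, m
--     return res
-- ===== Notes on version B (the rewrite author's own statement) =====
-- stated objective: alternative
-- what changed: B computes simBP by binary search on the common-prefix length (slice comparisons) instead of A's character-by-character loop, and scans the interval ascending with strict improvement instead of A's descending scan with >=.
import Mathlib
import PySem

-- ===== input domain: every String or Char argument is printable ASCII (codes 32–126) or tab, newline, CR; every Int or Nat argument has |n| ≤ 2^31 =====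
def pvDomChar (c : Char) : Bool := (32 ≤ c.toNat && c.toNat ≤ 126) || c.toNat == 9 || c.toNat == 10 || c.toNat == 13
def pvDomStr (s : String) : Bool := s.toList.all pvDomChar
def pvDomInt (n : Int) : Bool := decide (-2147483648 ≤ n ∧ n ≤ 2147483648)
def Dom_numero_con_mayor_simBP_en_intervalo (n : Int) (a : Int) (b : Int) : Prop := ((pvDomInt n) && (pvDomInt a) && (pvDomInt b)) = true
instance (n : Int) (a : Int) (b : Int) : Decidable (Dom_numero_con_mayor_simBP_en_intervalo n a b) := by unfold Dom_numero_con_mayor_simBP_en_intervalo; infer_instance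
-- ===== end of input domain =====

-- B computes simBP by binary search on the common-prefix length of the binary strings
-- (slice comparisons) instead of A's character-by-character loop, and scans the interval
-- ascending with strict improvement (objective: alternative algorithm; same values everywhere).

-- termination helpers for the ports (hand-written small proofs; cited by name in decreasing_by)
theorem pvDecSub (x i : Int) (h : i < x) : (x - (i + 1)).toNat < (x - i).toNat :=
  (Int.toNat_lt_toNat (Int.sub_pos.mpr h)).mpr (sub_lt_sub_left (lt_add_one i) x)

theorem pvMidLower (lo hi : Int) (h : lo < hi) : lo + 1 ≤ PySem.Int.floordiv (lo + hi + 1) 2 :=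
  (PySem.Int.le_floordiv_iff_mul_le (by decide)).mpr
    (by rw [mul_two, ← add_right_comm lo 1 hi]; exact Int.add_le_add_left (Int.add_one_le_iff.mpr h) (lo + 1))

theorem pvMidUpper (lo hi : Int) (h : lo < hi) : PySem.Int.floordiv (lo + hi + 1) 2 < hi + 1 :=
  (PySem.Int.floordiv_lt_iff_lt_mul (by decide)).mpr
    (by rw [mul_two, add_assoc]; exact Int.add_lt_add_right (lt_trans h (lt_add_one hi)) (hi + 1))

theorem pvDecHi (lo hi m : Int) (hlh : lo < hi) (h1 : lo + 1 ≤ m) :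
    (hi - m).toNat < (hi - lo).toNat :=
  (Int.toNat_lt_toNat (Int.sub_pos.mpr hlh)).mpr (sub_lt_sub_left (Int.add_one_le_iff.mp h1) hi)

theorem pvDecLo (lo hi m : Int) (hlh : lo < hi) (h2 : m < hi + 1) :
    (m - 1 - lo).toNat < (hi - lo).toNat :=
  (Int.toNat_lt_toNat (Int.sub_pos.mpr hlh)).mpr
    (sub_lt_sub_right (lt_of_lt_of_le (sub_one_lt m) (Int.lt_add_one_iff.mp h2)) lo)

-- ===== PORT A =====
-- while loop of simBP: i, res as in the Python; in the else branch the Python sets i past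
-- the length, so the while-condition fails and res is returned.
def pvSimBPLoop (cn cm : List Char) (i res : Int) : Int :=
  if _h : i < (cn.length : Int) ∧ i < (cm.length : Int) then
    if PySem.List.pyGet? cn i = PySem.List.pyGet? cm i then
      pvSimBPLoop cn cm (i + 1) (res + 1)
    else res
  else res
termination_by ((cn.length : Int) - i).toNat
decreasing_by exact pvDecSub _ i _h.1

-- simBP(n, m): bin(..).replace('0b','') and the character loop
def pvSimBP (n m : Int) : Int :=
  let num_binario_n := PySem.Str.replace (PySem.Int.pyBin n) "0b" ""
  let num_binario_m := PySem.Str.replace (PySem.Int.pyBin m) "0b" ""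
  pvSimBPLoop num_binario_n.toList num_binario_m.toList 0 0

-- while loop of numero_con_mayor_simBP_en_intervalo (the locals numero_en_intervalo = b - i
-- and simBP_valor = pvSimBP (b - i) n are inlined)
def pvLoopA (n b diff i mayor res : Int) : Int :=
  if _h : i ≤ diff then
    if pvSimBP (b - i) n ≥ mayor then pvLoopA n b diff (i + 1) (pvSimBP (b - i) n) (b - i)
    else pvLoopA n b diff (i + 1) mayor res
  else res
termination_by (diff + 1 - i).toNat
decreasing_by all_goals exact pvDecSub (diff + 1) i (Int.lt_add_one_iff.mpr _h)

def numero_con_mayor_simBP_en_intervalo (n : Int) (a : Int) (b : Int) : Int :=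
  pvLoopA n b (b - a) 0 0 0

-- ===== PORT B =====
-- the while loop of Source B's _simbp: binary search for the largest k with sx[:k] == sy[:k]
def pvBinSearch (sx sy : List Char) (lo hi : Int) : Int :=
  if _h : lo < hi then
    if PySem.List.slice sx none (some (PySem.Int.floordiv (lo + hi + 1) 2)) =
        PySem.List.slice sy none (some (PySem.Int.floordiv (lo + hi + 1) 2)) then
      pvBinSearch sx sy (PySem.Int.floordiv (lo + hi + 1) 2) hi
    else pvBinSearch sx sy lo (PySem.Int.floordiv (lo + hi + 1) 2 - 1)
  else lo
termination_by (hi - lo).toNat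
decreasing_by
  · exact pvDecHi lo hi _ _h (pvMidLower lo hi _h)
  · exact pvDecLo lo hi _ _h (pvMidUpper lo hi _h)

-- _simbp of Source B (strings as lists of code points)
def pvSimbpAlt (x y : Int) : Int :=
  let sx := (PySem.Str.replace (PySem.Int.pyBin x) "0b" "").toList
  let sy := (PySem.Str.replace (PySem.Int.pyBin y) "0b" "").toList
  pvBinSearch sx sy 0 (min (sx.length : Int) (sy.length : Int))

def numero_con_mayor_simBP_en_intervalo_alt (n : Int) (a : Int) (b : Int) : Int :=
  ((PySem.List.pyRange a (b + 1) 1).foldl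
    (fun st m => let s := pvSimbpAlt m n; if s > st.1 then (s, m) else st)
    (-1, 0)).2

-- ===== PRECONDITION & SPEC =====
def Spec_numero_con_mayor_simBP_en_intervalo (n : Int) (a : Int) (b : Int) (out : Int) : Prop := out = numero_con_mayor_simBP_en_intervalo_alt n a b
instance (n : Int) (a : Int) (b : Int) (out : Int) : Decidable (Spec_numero_con_mayor_simBP_en_intervalo n a b out) := by unfold Spec_numero_con_mayor_simBP_en_intervalo; infer_instance

-- ===== CLAIM (what is proved, stated in full; the proofs are below) =====
def Claim_equal_numero_con_mayor_simBP_en_intervalo : Prop := ∀ (n : Int) (a : Int) (b : Int), Dom_numero_con_mayor_simBP_en_intervalo n a b → Spec_numero_con_mayor_simBP_en_intervalo n a b (numero_con_mayor_simBP_en_intervalo n a b)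

-- ===== LEMMAS AND PROOFS =====

-- common-prefix length of two character lists
def pvCpl : List Char → List Char → Int
  | x :: xs, y :: ys => if x = y then 1 + pvCpl xs ys else 0
  | _, _ => 0

-- first maximiser (value, argument) of f on a list, ties to the earlier element
def pvBestOf (f : Int → Int) : List Int → Option (Int × Int)
  | [] => none
  | x :: t =>
    match pvBestOf f t with
    | none => some (f x, x)
    | some (v, r) => if v > f x then some (v, r) else some (f x, x)

-- ---- strings: bin(n).replace('0b','') = binary digits ----

theorem pvDigitsCore_mem (fuel : Nat) : ∀ (n : Nat) (acc : List Char),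
    (∀ c ∈ acc, c = '0' ∨ c = '1') → ∀ c ∈ Nat.toDigitsCore 2 fuel n acc, c = '0' ∨ c = '1' := by
  induction fuel with
  | zero => intro n acc hacc c hc; rw [Nat.toDigitsCore] at hc; exact hacc c hc
  | succ f ih =>
    intro n acc hacc c hc
    rw [Nat.toDigitsCore] at hc
    have hd : Nat.digitChar (n % 2) = '0' ∨ Nat.digitChar (n % 2) = '1' := by
      have h2 : n % 2 = 0 ∨ n % 2 = 1 := by omega
      rcases h2 with h2 | h2 <;> rw [h2]
      · left; rfl
      · right; rfl
    by_cases h : n / 2 = 0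
    · rw [if_pos h] at hc
      rcases List.mem_cons.mp hc with h1 | h1
      · exact h1 ▸ hd
      · exact hacc c h1
    · rw [if_neg h] at hc
      exact ih (n / 2) _ (fun d hdm => (List.mem_cons.mp hdm).elim (fun e => e ▸ hd) (hacc d)) c hc

theorem pvDigits_mem (m : Nat) : ∀ c ∈ Nat.toDigits 2 m, c = '0' ∨ c = '1' := by
  intro c hc
  exact pvDigitsCore_mem (m + 1) m [] (by simp) c hc

theorem pvGo_no0b : ∀ (l : List Char) (fuel : Nat) (acc : List Char), l.length ≤ fuel →
    (∀ c ∈ l, c = '0' ∨ c = '1') →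
    PySem.Chars.replace.go ['0', 'b'] [] fuel l acc = acc.reverse ++ l := by
  intro l
  induction l with
  | nil =>
    intro fuel acc _ _
    cases fuel <;> rw [PySem.Chars.replace.go.eq_def] <;> simp
  | cons c t ih =>
    intro fuel acc hlen hmem
    cases fuel with
    | zero => simp at hlen
    | succ f =>
      rw [PySem.Chars.replace.go.eq_def]
      have hpref : List.isPrefixOf ['0', 'b'] (c :: t) = false := by
        cases t with
        | nil => simp [List.isPrefixOf]
        | cons d t' =>
          have hd : d = '0' ∨ d = '1' := hmem d (by simp)
          rcases hd with h | h <;> subst h <;> simp [List.isPrefixOf]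
      simp only [hpref, Bool.false_eq_true, if_neg, not_false_iff]
      rw [ih f (c :: acc) (by simpa using hlen) (fun d hd => hmem d (by simp [hd]))]
      simp

theorem pvReplace_toList (n : Int) :
    (PySem.Str.replace (PySem.Int.pyBin n) "0b" "").toList = PySem.Int.toBinChars n := by
  rw [PySem.Str.toList_replace, PySem.Int.toList_pyBin]
  have h0b : ("0b" : String).toList = ['0', 'b'] := by decide
  have h0 : ("" : String).toList = [] := by decide
  rw [h0b, h0]
  unfold PySem.Chars.replace
  simp only [List.isEmpty_iff, if_neg (by simp : ¬(['0', 'b'] : List Char) = [])]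
  unfold PySem.Int.toBinChars0b PySem.Int.toBinChars
  by_cases hn : n < 0
  · simp only [hn, if_pos]
    rw [PySem.Chars.replace.go.eq_def]
    simp only [List.length_cons]
    have hp1 : List.isPrefixOf ['0', 'b'] ('-' :: '0' :: 'b' :: Nat.toDigits 2 n.natAbs) = false := by
      simp [List.isPrefixOf]
    simp only [hp1, Bool.false_eq_true, if_neg, not_false_iff]
    rw [PySem.Chars.replace.go.eq_def]
    have hp2 : List.isPrefixOf ['0', 'b'] ('0' :: 'b' :: Nat.toDigits 2 n.natAbs) = true := by
      simp [List.isPrefixOf]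
    simp only [hp2, if_pos]
    exact (pvGo_no0b (Nat.toDigits 2 n.natAbs) _ _ (Nat.le_succ _) (pvDigits_mem _)).trans (by simp)
  · simp only [hn, if_neg, not_false_iff]
    rw [PySem.Chars.replace.go.eq_def]
    simp only [List.length_cons]
    have hp2 : List.isPrefixOf ['0', 'b'] ('0' :: 'b' :: Nat.toDigits 2 n.toNat) = true := by
      simp [List.isPrefixOf]
    simp only [hp2, if_pos]
    exact (pvGo_no0b (Nat.toDigits 2 n.toNat) _ _ (Nat.le_succ _) (pvDigits_mem _)).trans (by simp)

-- ---- pvCpl facts ----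

theorem pvCpl_nonneg : ∀ u v : List Char, 0 ≤ pvCpl u v := by
  intro u
  induction u with
  | nil => intro v; cases v <;> simp [pvCpl]
  | cons x xs ih =>
    intro v
    cases v with
    | nil => simp [pvCpl]
    | cons y ys =>
      simp only [pvCpl]
      split_ifs
      · have := ih ys; omega
      · omega

theorem pvCpl_nil_left : ∀ u : List Char, pvCpl [] u = 0 := by
  intro u; cases u <;> rfl

theorem pvCpl_nil_right : ∀ u : List Char, pvCpl u [] = 0 := by
  intro u; cases u <;> rfl

theorem pvCpl_le : ∀ u v : List Char, pvCpl u v ≤ (u.length : Int) ∧ pvCpl u v ≤ (v.length : Int) := by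
  intro u
  induction u with
  | nil => intro v; rw [pvCpl_nil_left]; exact ⟨by positivity, by positivity⟩
  | cons x xs ih =>
    intro v
    cases v with
    | nil => rw [pvCpl_nil_right]; exact ⟨by positivity, by positivity⟩
    | cons y ys =>
      simp only [pvCpl, List.length_cons]
      obtain ⟨h1, h2⟩ := ih ys
      split_ifs <;> push_cast <;> omega

theorem pvCpl_take : ∀ (u v : List Char) (k : Nat), k ≤ u.length → k ≤ v.length →
    (u.take k = v.take k ↔ (k : Int) ≤ pvCpl u v) := by
  intro u
  induction u with
  | nil =>
    intro v k h1 _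
    have hk : k = 0 := Nat.le_zero.mp h1
    subst hk
    simp [pvCpl_nonneg]
  | cons x xs ih =>
    intro v k h1 h2
    cases v with
    | nil =>
      have hk : k = 0 := Nat.le_zero.mp h2
      subst hk
      simp [pvCpl_nonneg]
    | cons y ys =>
      cases k with
      | zero => simp [pvCpl_nonneg]
      | succ k' =>
        simp only [List.take_succ_cons, List.cons.injEq, pvCpl]
        by_cases hxy : x = y
        · subst hxy
          rw [if_pos rfl]
          have hiff := ih ys k' (by simpa using h1) (by simpa using h2)
          constructor
          · rintro ⟨-, h⟩
            have := hiff.mp h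
            push_cast
            omega
          · intro h
            refine ⟨rfl, hiff.mpr ?_⟩
            push_cast at h
            omega
        · rw [if_neg hxy]
          constructor
          · rintro ⟨h, -⟩
            exact absurd h hxy
          · intro h
            exfalso
            push_cast at h
            omega

-- ---- A's simBP loop computes pvCpl ----

theorem pvSimBPLoop_eq (cn cm : List Char) : ∀ (i res : Int), 0 ≤ i →
    pvSimBPLoop cn cm i res = res + pvCpl (cn.drop i.toNat) (cm.drop i.toNat) := by
  intro i res hi
  induction i, res using pvSimBPLoop.induct cn cm with
  | case1 i res h heq ih =>
    obtain ⟨h1, h2⟩ := h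
    have hin : i.toNat < cn.length := by omega
    have him : i.toNat < cm.length := by omega
    have hg1 : PySem.List.pyGet? cn i = some cn[i.toNat] := by
      rw [PySem.List.pyGet?_of_nonneg _ hi]; exact List.getElem?_eq_getElem hin
    have hg2 : PySem.List.pyGet? cm i = some cm[i.toNat] := by
      rw [PySem.List.pyGet?_of_nonneg _ hi]; exact List.getElem?_eq_getElem him
    have hchar : cn[i.toNat] = cm[i.toNat] := by
      rw [hg1, hg2] at heq; exact Option.some.inj heq
    rw [pvSimBPLoop, dif_pos ⟨h1, h2⟩, if_pos heq, ih (by omega)]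
    rw [show (i + 1).toNat = i.toNat + 1 from by omega]
    rw [List.drop_eq_getElem_cons hin, List.drop_eq_getElem_cons him]
    simp only [pvCpl, hchar, if_pos]
    ring
  | case2 i res h heq =>
    obtain ⟨h1, h2⟩ := h
    have hin : i.toNat < cn.length := by omega
    have him : i.toNat < cm.length := by omega
    have hg1 : PySem.List.pyGet? cn i = some cn[i.toNat] := by
      rw [PySem.List.pyGet?_of_nonneg _ hi]; exact List.getElem?_eq_getElem hin
    have hg2 : PySem.List.pyGet? cm i = some cm[i.toNat] := by
      rw [PySem.List.pyGet?_of_nonneg _ hi]; exact List.getElem?_eq_getElem him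
    have hchar : ¬ (cn[i.toNat] = cm[i.toNat]) := by
      intro hcc
      exact heq (by rw [hg1, hg2, hcc])
    rw [pvSimBPLoop, dif_pos ⟨h1, h2⟩, if_neg heq]
    rw [List.drop_eq_getElem_cons hin, List.drop_eq_getElem_cons him]
    simp only [pvCpl, hchar, if_neg, not_false_iff]
    ring
  | case3 i res h =>
    rw [pvSimBPLoop, dif_neg h]
    have hnil : cn.drop i.toNat = [] ∨ cm.drop i.toNat = [] := by
      rcases not_and_or.mp h with h' | h'
      · left; apply List.drop_eq_nil_of_le; omega
      · right; apply List.drop_eq_nil_of_le; omega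
    rcases hnil with h' | h' <;> rw [h']
    · rw [pvCpl_nil_left]; ring
    · rw [pvCpl_nil_right]; ring

theorem pvSimBP_cpl (x y : Int) :
    pvSimBP x y = pvCpl (PySem.Int.toBinChars x) (PySem.Int.toBinChars y) := by
  unfold pvSimBP
  rw [pvSimBPLoop_eq _ _ 0 0 le_rfl]
  rw [pvReplace_toList, pvReplace_toList]
  simp

theorem pvSimBP_nonneg (x y : Int) : 0 ≤ pvSimBP x y := by
  rw [pvSimBP_cpl]; exact pvCpl_nonneg _ _

-- ---- B's binary search computes pvCpl ----

theorem pvBinSearch_eq (sx sy : List Char) : ∀ (lo hi : Int), 0 ≤ lo →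
    lo ≤ pvCpl sx sy → pvCpl sx sy ≤ hi →
    hi ≤ (sx.length : Int) → hi ≤ (sy.length : Int) →
    pvBinSearch sx sy lo hi = pvCpl sx sy := by
  intro lo hi
  induction lo, hi using pvBinSearch.induct sx sy with
  | case1 lo hi h heq ih =>
    intro hlo hlocpl hcplhi hhx hhy
    rw [pvBinSearch, dif_pos h, if_pos heq]
    have hmid : PySem.Int.floordiv (lo + hi + 1) 2 = (lo + hi + 1) / 2 :=
      PySem.Int.floordiv_eq_ediv_of_pos (by omega)
    set mid := PySem.Int.floordiv (lo + hi + 1) 2 with hmiddef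
    have hb1 : lo < mid := by omega
    have hb2 : mid ≤ hi := by omega
    have hmn : mid.toNat ≤ sx.length ∧ mid.toNat ≤ sy.length := by omega
    have htake : sx.take mid.toNat = sy.take mid.toNat := by
      rw [PySem.List.slice_to sx (by omega), PySem.List.slice_to sy (by omega)] at heq
      exact heq
    have hle : (mid.toNat : Int) ≤ pvCpl sx sy :=
      (pvCpl_take sx sy mid.toNat hmn.1 hmn.2).mp htake
    exact ih (by omega) (by omega) hcplhi hhx hhy
  | case2 lo hi h heq ih =>
    intro hlo hlocpl hcplhi hhx hhy
    rw [pvBinSearch, dif_pos h, if_neg heq]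
    have hmid : PySem.Int.floordiv (lo + hi + 1) 2 = (lo + hi + 1) / 2 :=
      PySem.Int.floordiv_eq_ediv_of_pos (by omega)
    set mid := PySem.Int.floordiv (lo + hi + 1) 2 with hmiddef
    have hb1 : lo < mid := by omega
    have hb2 : mid ≤ hi := by omega
    have hmn : mid.toNat ≤ sx.length ∧ mid.toNat ≤ sy.length := by omega
    have hnle : ¬ ((mid.toNat : Int) ≤ pvCpl sx sy) := by
      intro hcontra
      apply heq
      rw [PySem.List.slice_to sx (by omega), PySem.List.slice_to sy (by omega)]
      exact (pvCpl_take sx sy mid.toNat hmn.1 hmn.2).mpr hcontra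
    exact ih hlo hlocpl (by omega) (by omega) (by omega)
  | case3 lo hi h =>
    intro hlo hlocpl hcplhi hhx hhy
    rw [pvBinSearch, dif_neg h]
    omega

theorem pvSimBP_eq (x y : Int) : pvSimBP x y = pvSimbpAlt x y := by
  rw [pvSimBP_cpl]
  unfold pvSimbpAlt
  simp only [pvReplace_toList]
  refine (pvBinSearch_eq _ _ 0 _ le_rfl (pvCpl_nonneg _ _) ?_ ?_ ?_).symm
  · exact le_min (pvCpl_le _ _).1 (pvCpl_le _ _).2
  · exact min_le_left _ _
  · exact min_le_right _ _

-- ---- loop equivalence ----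

theorem pvBestOf_append (f : Int → Int) : ∀ (l : List Int) (z : Int),
    pvBestOf f (l ++ [z]) =
      match pvBestOf f l with
      | none => some (f z, z)
      | some (v, r) => if f z > v then some (f z, z) else some (v, r) := by
  intro l
  induction l with
  | nil => intro z; simp [pvBestOf]
  | cons x t ih =>
    intro z
    simp only [List.cons_append, pvBestOf]
    rw [ih z]
    rcases h : pvBestOf f t with _ | ⟨v, r⟩ <;> dsimp only <;>
      split_ifs <;> (try dsimp only) <;> (try split_ifs) <;>
      first | rfl | omega | (dsimp only at *; omega)

theorem pvBestOf_spec (f : Int → Int) : ∀ (l : List Int) (v r : Int),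
    pvBestOf f l = some (v, r) → v = f r ∧ r ∈ l := by
  intro l
  induction l with
  | nil => intro v r h; simp [pvBestOf] at h
  | cons x t ih =>
    intro v r h
    rw [pvBestOf] at h
    rcases ht : pvBestOf f t with _ | ⟨v', r'⟩ <;> rw [ht] at h <;> dsimp only at h
    · have h' := Option.some.inj h
      have h1 : f x = v := congrArg Prod.fst h'
      have h2 : x = r := congrArg Prod.snd h'
      exact ⟨by rw [← h1, ← h2], by rw [← h2]; exact List.mem_cons_self⟩
    · split_ifs at h with hc
      · have h' := Option.some.inj h
        have h1 : v' = v := congrArg Prod.fst h'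
        have h2 : r' = r := congrArg Prod.snd h'
        obtain ⟨hv', hr'⟩ := ih v' r' ht
        refine ⟨by rw [← h1, ← h2]; exact hv', by rw [← h2]; exact List.mem_cons_of_mem x hr'⟩
      · have h' := Option.some.inj h
        have h1 : f x = v := congrArg Prod.fst h'
        have h2 : x = r := congrArg Prod.snd h'
        exact ⟨by rw [← h1, ← h2], by rw [← h2]; exact List.mem_cons_self⟩

theorem pvFoldB (f : Int → Int) : ∀ (l : List Int) (s : Int × Int),
    l.foldl (fun st m => let sv := f m; if sv > st.1 then (sv, m) else st) s =
      match pvBestOf f l with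
      | none => s
      | some (v, r) => if v > s.1 then (v, r) else s := by
  intro l
  induction l with
  | nil => intro s; simp [pvBestOf]
  | cons x t ih =>
    intro s
    rw [List.foldl_cons, ih]
    simp only [pvBestOf]
    rcases h : pvBestOf f t with _ | ⟨v, r⟩ <;>
      rcases s with ⟨sv, sr⟩ <;> dsimp only <;> split_ifs <;>
      (try dsimp only) <;> (try dsimp only at *) <;> (try split_ifs) <;>
      first | rfl | omega

theorem pvLoopA_eq (n b diff : Int) : ∀ (i mayor res : Int),
    pvLoopA n b diff i mayor res =
      match pvBestOf (fun m => pvSimBP m n) (PySem.List.pyRange (b - diff) (b - i + 1) 1) with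
      | none => res
      | some (v, r) => if v ≥ mayor then r else res := by
  intro i mayor res
  induction i, mayor, res using pvLoopA.induct n b diff with
  | case1 i mayor res h hge ih =>
    rw [pvLoopA, dif_pos h, if_pos hge, ih]
    rw [show b - (i + 1) + 1 = b - i from by ring]
    rw [show PySem.List.pyRange (b - diff) (b - i + 1) 1 =
        PySem.List.pyRange (b - diff) (b - i) 1 ++ [b - i] from
      PySem.List.pyRange_one_succ_right (by omega)]
    rw [pvBestOf_append]
    rcases hbb : pvBestOf (fun m => pvSimBP m n) (PySem.List.pyRange (b - diff) (b - i) 1)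
      with _ | ⟨v, r⟩ <;> dsimp only <;> split_ifs <;>
      (try dsimp only) <;> (try dsimp only at *) <;> (try split_ifs) <;>
      first | rfl | omega
  | case2 i mayor res h hge ih =>
    rw [pvLoopA, dif_pos h, if_neg hge, ih]
    rw [show b - (i + 1) + 1 = b - i from by ring]
    rw [show PySem.List.pyRange (b - diff) (b - i + 1) 1 =
        PySem.List.pyRange (b - diff) (b - i) 1 ++ [b - i] from
      PySem.List.pyRange_one_succ_right (by omega)]
    rw [pvBestOf_append]
    rcases hbb : pvBestOf (fun m => pvSimBP m n) (PySem.List.pyRange (b - diff) (b - i) 1)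
      with _ | ⟨v, r⟩ <;> dsimp only <;> split_ifs <;>
      (try dsimp only) <;> (try dsimp only at *) <;> (try split_ifs) <;>
      first | rfl | omega
  | case3 i mayor res h =>
    rw [pvLoopA, dif_neg h]
    rw [show PySem.List.pyRange (b - diff) (b - i + 1) 1 = [] from
      PySem.List.pyRange_one_eq_nil (by omega)]
    rfl

-- ===== VERDICT (by name: the statement is the Claim_ definition above) =====
theorem numero_con_mayor_simBP_en_intervalo_spec : Claim_equal_numero_con_mayor_simBP_en_intervalo := by
  intro n a b _
  unfold Spec_numero_con_mayor_simBP_en_intervalo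
  unfold numero_con_mayor_simBP_en_intervalo numero_con_mayor_simBP_en_intervalo_alt
  rw [pvLoopA_eq]
  rw [show b - (b - a) = a from by ring, show b - 0 + 1 = b + 1 from by ring]
  rw [show (fun (st : Int × Int) (m : Int) => let s := pvSimbpAlt m n; if s > st.1 then (s, m) else st)
      = (fun (st : Int × Int) (m : Int) =>
          let sv := (fun mm => pvSimbpAlt mm n) m; if sv > st.1 then (sv, m) else st) from rfl]
  rw [pvFoldB]
  rw [show (fun m => pvSimBP m n) = (fun m => pvSimbpAlt m n) from
    funext fun m => pvSimBP_eq m n]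
  rcases hb : pvBestOf (fun m => pvSimbpAlt m n) (PySem.List.pyRange a (b + 1) 1)
    with _ | ⟨v, r⟩
  · dsimp only
  · dsimp only
    have hv := pvBestOf_spec _ _ _ _ hb
    have hsa : 0 ≤ pvSimbpAlt r n := by rw [← pvSimBP_eq]; exact pvSimBP_nonneg r n
    have hnn : 0 ≤ v := by rw [hv.1]; exact hsa
    rw [if_pos (by omega : v ≥ 0), if_pos (by omega : v > (-1 : Int))]
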